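-- pv_equiv track=rewrite | github.com/banana-galaxy/challenges | challenge8(theater_escape)/chief141.py | whichExit
-- ===== SOURCE A (Python) =====
-- def whichExit(a):
--     z,c={"l":0,"r":0},"l"
--     for m in a:
--         if 0 in m:
--             for i in m:
--                 if i==0:c="r"
--                 elif i==1:z[c]+=1
--             break
--     k="right" if z["l"]>z["r"]else"left"if z["l"]<z["r"]else"same"
--     return k
-- ===== SOURCE B (Python) =====
-- def whichExit(a):
--     for m in a:
--         if 0 in m:
--             idx = m.index(0)
--             left = m[:idx].count(1)
--             right = m[idx+1:].count(1)
--             if left > right: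
--                 return "right"
--             if left < right:
--                 return "left"
--             return "same"
--     return "same"
-- ===== Notes on version B (the rewrite author's own statement) =====
-- stated objective: simpler
-- what changed: Replaced the flag-threaded dict-accumulating scan with a locate-then-split decomposition: find the first zero's index, count 1s in the two slices around it, return early.
import Mathlib
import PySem

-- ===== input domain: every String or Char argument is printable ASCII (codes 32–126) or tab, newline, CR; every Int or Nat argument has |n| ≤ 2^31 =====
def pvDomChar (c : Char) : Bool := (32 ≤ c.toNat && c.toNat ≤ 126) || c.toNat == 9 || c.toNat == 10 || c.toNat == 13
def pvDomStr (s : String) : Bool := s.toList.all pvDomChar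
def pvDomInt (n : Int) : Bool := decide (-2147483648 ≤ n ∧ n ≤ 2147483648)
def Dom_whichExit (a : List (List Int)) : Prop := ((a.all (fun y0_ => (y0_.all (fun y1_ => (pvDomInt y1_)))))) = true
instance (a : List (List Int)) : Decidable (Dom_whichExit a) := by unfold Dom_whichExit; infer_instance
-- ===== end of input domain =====

-- B replaces A's flag-threaded accumulator scan by locate-first-zero then count 1s in the two slices (simpler decomposition).


-- ===== PORT A =====
-- the dict {"l":.., "r":..} is a pair (l-count, r-count); c is the flag string "l"/"r"
def pvStepA (st : (Int × Int) × String) (i : Int) : (Int × Int) × String :=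
  if i = 0 then (st.1, "r")
  else if i = 1 then
    (if st.2 = "l" then ((st.1.1 + 1, st.1.2), st.2) else ((st.1.1, st.1.2 + 1), st.2))
  else st

-- the outer 'for m in a: if 0 in m: … break' loop
def pvLoopA (rows : List (List Int)) (st : (Int × Int) × String) : (Int × Int) × String :=
  match rows with
  | [] => st
  | m :: rest => if (0 : Int) ∈ m then m.foldl pvStepA st else pvLoopA rest st

def whichExit (a : List (List Int)) : String :=
  let st := pvLoopA a ((0, 0), "l")
  if st.1.1 > st.1.2 then "right" else if st.1.1 < st.1.2 then "left" else "same"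

-- ===== PORT B =====
def pvGoB (rows : List (List Int)) : String :=
  match rows with
  | [] => "same"
  | m :: rest =>
    if (0 : Int) ∈ m then
      match PySem.List.index? m 0 with
      | some idx =>
        let left := PySem.List.count (PySem.List.slice m none (some (idx : Int))) 1
        let right := PySem.List.count (PySem.List.slice m (some ((idx : Int) + 1)) none) 1
        if left > right then "right" else if left < right then "left" else "same"
      | none => "same"   -- unreachable: guarded by 0 ∈ m
    else pvGoB rest

def whichExit_alt (a : List (List Int)) : String := pvGoB a

-- ===== PRECONDITION & SPEC =====
def Spec_whichExit (a : List (List Int)) (out : String) : Prop := out = whichExit_alt a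
instance (a : List (List Int)) (out : String) : Decidable (Spec_whichExit a out) := by unfold Spec_whichExit; infer_instance

-- ===== CLAIM (what is proved, stated in full; the proofs are below) =====
def Claim_equal_whichExit : Prop := ∀ (a : List (List Int)), Dom_whichExit a → Spec_whichExit a (whichExit a)

-- ===== LEMMAS AND PROOFS =====

-- after the first 0 the flag stays "r": only 1s add to the right counter
theorem pv_foldR (m : List Int) (zl zr : Int) :
    m.foldl pvStepA ((zl, zr), "r") = ((zl, zr + (m.count 1 : Int)), "r") := by
  induction m generalizing zr with
  | nil => simp
  | cons x xs ih =>
    by_cases h0 : x = 0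
    · subst h0; simp [pvStepA, ih]
    · by_cases h1 : x = 1
      · subst h1; simp [pvStepA, ih]; ring
      · simp [pvStepA, h0, h1, ih]

-- before the first 0 the flag is "l": 1s in the prefix go left, the 0 flips, the suffix goes right
theorem pv_foldL (pre suf : List Int) (zl zr : Int) (hpre : (0 : Int) ∉ pre) :
    (pre ++ 0 :: suf).foldl pvStepA ((zl, zr), "l")
      = ((zl + (pre.count 1 : Int), zr + (suf.count 1 : Int)), "r") := by
  induction pre generalizing zl with
  | nil => simp [pvStepA, pv_foldR]
  | cons x xs ih =>
    have hx0 : x ≠ 0 := fun h => hpre (h ▸ List.mem_cons_self)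
    have hxs : (0 : Int) ∉ xs := fun h => hpre (List.mem_cons_of_mem _ h)
    by_cases h1 : x = 1
    · subst h1
      simp [pvStepA, ih _ hxs]; ring
    · simp [pvStepA, hx0, h1, ih _ hxs]

-- the two recursions over rows agree
theorem pv_go_eq (a : List (List Int)) : whichExit a = whichExit_alt a := by
  induction a with
  | nil => rfl
  | cons m rest ih =>
    by_cases hm : (0 : Int) ∈ m
    · -- split m at its first zero
      obtain ⟨k, hk⟩ : ∃ k, PySem.List.index? m 0 = some k :=
        Option.isSome_iff_exists.mp ((PySem.List.index?_isSome_iff m 0).mpr hm)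
      obtain ⟨pre, suf, hms, hlen, hnp⟩ := (PySem.List.index?_eq_some_iff m 0 k).mp hk
      have hA : whichExit (m :: rest)
          = (if ((pre.count 1 : Int)) > ((suf.count 1 : Int)) then "right"
             else if ((pre.count 1 : Int)) < ((suf.count 1 : Int)) then "left" else "same") := by
        simp only [whichExit, pvLoopA, hms]
        rw [pv_foldL pre suf 0 0 hnp]
        simp
      have hslice1 : PySem.List.slice m none (some (k : Int)) = pre := by
        rw [hms, PySem.List.slice_to_natCast, ← hlen, List.take_left]
      have hslice2 : PySem.List.slice m (some ((k : Int) + 1)) none = suf := by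
        have : ((k : Int) + 1) = ((k + 1 : Nat) : Int) := by push_cast; ring
        rw [hms, this, PySem.List.slice_from_natCast, ← hlen]
        simp [List.drop_append]
      have hB : whichExit_alt (m :: rest)
          = (if pre.count 1 > suf.count 1 then "right"
             else if pre.count 1 < suf.count 1 then "left" else "same") := by
        simp only [whichExit_alt, pvGoB, hm, if_pos, hk, hslice1, hslice2,
          PySem.List.count_eq]
      rw [hA, hB]
      by_cases h1 : pre.count 1 > suf.count 1
      · simp [h1]
      · have h1' : ¬ ((pre.count 1 : Int) > (suf.count 1 : Int)) := by exact_mod_cast h1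
        by_cases h2 : pre.count 1 < suf.count 1
        · simp [h1, h2, h1']
        · have h2' : ¬ ((pre.count 1 : Int) < (suf.count 1 : Int)) := by exact_mod_cast h2
          simp [h1, h2, h1', h2']
    · simpa [whichExit, whichExit_alt, pvLoopA, pvGoB, hm] using ih

-- ===== VERDICT (by name: the statement is the Claim_ definition above) =====
theorem whichExit_spec : Claim_equal_whichExit := by
  intro a _
  unfold Spec_whichExit
  exact pv_go_eq a
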